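-- pv_equiv track=rewrite | github.com/Night-fury0/competitive-programming | advent_of_code/2024/9/part2.py | find_consecutive_dots
-- ===== SOURCE A (Python) =====
-- def find_consecutive_dots(lst, n):
--     count = 0
--     for idx, value in enumerate(lst):
--         if value == '.':
--             count += 1
--             if count == n:
--                 return idx - n + 1
--         else:
--             count = 0
--     return None
-- ===== SOURCE B (Python) =====
-- def find_consecutive_dots(lst, n):
--     # Group-scan: jump over maximal runs of equal elements instead of
--     # maintaining a per-element counter.
--     i = 0
--     while i < len(lst):
--         j = i + 1
--         while j < len(lst) and lst[j] == lst[i]: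
--             j += 1
--         if lst[i] == '.' and 1 <= n <= j - i:
--             return i
--         i = j
--     return None
-- ===== Notes on version B (the rewrite author's own statement) =====
-- stated objective: alternative
-- what changed: Replaces A's per-element running dot-counter with a two-pointer group scan that jumps over maximal runs of equal elements and tests each dot-run's length against n directly.
import Mathlib
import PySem

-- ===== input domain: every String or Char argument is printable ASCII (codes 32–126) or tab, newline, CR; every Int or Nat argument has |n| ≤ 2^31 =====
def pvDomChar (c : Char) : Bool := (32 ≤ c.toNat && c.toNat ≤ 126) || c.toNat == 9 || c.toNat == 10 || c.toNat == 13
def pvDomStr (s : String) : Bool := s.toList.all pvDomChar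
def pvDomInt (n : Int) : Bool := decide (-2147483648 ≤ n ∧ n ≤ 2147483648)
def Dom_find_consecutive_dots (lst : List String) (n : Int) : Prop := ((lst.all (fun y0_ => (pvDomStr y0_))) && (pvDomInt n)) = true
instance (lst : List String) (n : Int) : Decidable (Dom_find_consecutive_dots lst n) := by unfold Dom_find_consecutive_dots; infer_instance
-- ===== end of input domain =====

-- B replaces A's per-element running dot-counter with a two-pointer group scan
-- over maximal runs of equal elements (alternative decomposition, same cost).


-- ===== PORT A =====
-- the for-loop over enumerate(lst) with its running `count`
def findConsecutiveDotsGo : List String → Int → Int → Int → Option Int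
  | [], _, _, _ => none
  | v :: rest, idx, count, n =>
    if v == "." then
      if count + 1 == n then some (idx - n + 1)
      else findConsecutiveDotsGo rest (idx + 1) (count + 1) n
    else findConsecutiveDotsGo rest (idx + 1) 0 n

def find_consecutive_dots (lst : List String) (n : Int) : Option Int :=
  findConsecutiveDotsGo lst 0 0 n

-- ===== PORT B =====
-- outer while-loop over the suffix starting at i; the inner while-loop that
-- advances j to the end of the run of elements equal to lst[i] is the
-- takeWhile/dropWhile split (j - i = 1 + length of the takeWhile part)
def findConsecutiveDotsAltGo (n : Int) : List String → Int → Option Int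
  | [], _ => none
  | x :: xs, i =>
    let t := xs.takeWhile (fun y => y == x)
    let len : Int := 1 + t.length
    if x == "." ∧ 1 ≤ n ∧ n ≤ len then some i
    else findConsecutiveDotsAltGo n (xs.dropWhile (fun y => y == x)) (i + len)
termination_by l _ => l.length
decreasing_by
  simp only [List.length_cons]
  exact Nat.lt_succ_of_le (List.length_dropWhile_le _ _)

def find_consecutive_dots_alt (lst : List String) (n : Int) : Option Int :=
  findConsecutiveDotsAltGo n lst 0

-- ===== PRECONDITION & SPEC =====
def Spec_find_consecutive_dots (lst : List String) (n : Int) (out : Option Int) : Prop := out = find_consecutive_dots_alt lst n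
instance (lst : List String) (n : Int) (out : Option Int) : Decidable (Spec_find_consecutive_dots lst n out) := by unfold Spec_find_consecutive_dots; infer_instance

-- ===== CLAIM (what is proved, stated in full; the proofs are below) =====
def Claim_equal_find_consecutive_dots : Prop := ∀ (lst : List String) (n : Int), Dom_find_consecutive_dots lst n → Spec_find_consecutive_dots lst n (find_consecutive_dots lst n)

-- ===== LEMMAS AND PROOFS =====

-- A's loop over a run of dots: returns idx - c iff n lands inside the run,
-- otherwise continues past the run with the accumulated count.
lemma aGo_run (t : List String) (ht : ∀ y ∈ t, y = ".") :
    ∀ (rest : List String) (idx c n : Int),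
    findConsecutiveDotsGo (t ++ rest) idx c n =
      if c < n ∧ n ≤ c + t.length then some (idx - c)
      else findConsecutiveDotsGo rest (idx + t.length) (c + t.length) n := by
  induction t with
  | nil =>
    intro rest idx c n
    rw [List.nil_append, if_neg (by push_cast [List.length_nil]; omega)]
    norm_num
  | cons y t ih =>
    intro rest idx c n
    have hy : y = "." := ht y (by simp)
    have ht' : ∀ z ∈ t, z = "." := fun z hz => ht z (by simp [hz])
    subst hy
    simp only [List.cons_append, findConsecutiveDotsGo, beq_self_eq_true, if_true]
    by_cases h : c + 1 = n
    · have : (c + 1 == n) = true := by simpa using h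
      rw [this]
      simp only [if_true]
      have hcond : c < n ∧ n ≤ c + ((List.cons "." t).length : Int) := by
        simp; omega
      rw [if_pos hcond]
      congr 1; omega
    · have : (c + 1 == n) = false := by simpa using h
      rw [this]
      simp only [Bool.false_eq_true, if_false]
      rw [ih ht' rest (idx + 1) (c + 1) n]
      simp only [List.length_cons]
      by_cases h2 : c < n ∧ n ≤ c + ((t.length : Int) + 1)
      · rw [if_pos (by push_cast; omega), if_pos (by push_cast at h2 ⊢; omega)]
        congr 1; omega
      · rw [if_neg (by push_cast; omega), if_neg (by push_cast at h2 ⊢; omega)]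
        congr 1 <;> push_cast <;> omega

-- A's loop over non-dot elements just resets the counter and moves on
lemma aGo_skip (t : List String) (ht : ∀ y ∈ t, y ≠ ".") :
    ∀ (rest : List String) (idx n : Int),
    findConsecutiveDotsGo (t ++ rest) idx 0 n =
      findConsecutiveDotsGo rest (idx + t.length) 0 n := by
  induction t with
  | nil => intro rest idx n; simp
  | cons y t ih =>
    intro rest idx n
    have hy : (y == ".") = false := by simpa using ht y (by simp)
    simp only [List.cons_append, findConsecutiveDotsGo, hy, Bool.false_eq_true, if_false]
    rw [ih (fun z hz => ht z (by simp [hz])) rest (idx + 1) n]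
    congr 1
    simp; omega

-- starting at an element that is not a dot, the initial count is irrelevant
lemma aGo_reset (rest : List String)
    (h : rest = [] ∨ ∃ y ys, rest = y :: ys ∧ (y == ".") = false) (i c n : Int) :
    findConsecutiveDotsGo rest i c n = findConsecutiveDotsGo rest i 0 n := by
  rcases h with h | ⟨y, ys, rfl, hy⟩
  · subst h; rfl
  · simp [findConsecutiveDotsGo, hy]

lemma dropWhile_head (p : String → Bool) (xs : List String) :
    xs.dropWhile p = [] ∨
    ∃ y ys, xs.dropWhile p = y :: ys ∧ p y = false := by
  induction xs with
  | nil => left; rfl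
  | cons x xs ih =>
    by_cases h : p x = true
    · simpa [List.dropWhile, h] using ih
    · right; exact ⟨x, xs, by simp [List.dropWhile, h], by simpa using h⟩

lemma main_lemma : ∀ (N : Nat) (lst : List String), lst.length ≤ N →
    ∀ (idx n : Int),
    findConsecutiveDotsGo lst idx 0 n = findConsecutiveDotsAltGo n lst idx := by
  intro N
  induction N with
  | zero =>
    intro lst h
    have : lst = [] := List.eq_nil_of_length_eq_zero (Nat.le_zero.mp h)
    subst this; intro idx n
    simp [findConsecutiveDotsGo, findConsecutiveDotsAltGo]
  | succ N ih =>
    intro lst hlen idx n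
    cases lst with
    | nil => simp [findConsecutiveDotsGo, findConsecutiveDotsAltGo]
    | cons x xs =>
      have hsplit : xs.takeWhile (fun y => y == x) ++ xs.dropWhile (fun y => y == x) = xs :=
        List.takeWhile_append_dropWhile
      have hdroplen : (xs.dropWhile (fun y => y == x)).length ≤ N := by
        have := List.length_dropWhile_le (fun y => y == x) xs
        simp at hlen; omega
      have htake : ∀ y ∈ xs.takeWhile (fun y => y == x), y = x := by
        intro y hy
        have : (y == x) = true := List.mem_takeWhile_imp (p := fun y => y == x) hy
        simpa using this
      by_cases hx : x = "."
      · subst hx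
        -- the run of dots is "." :: takeWhile
        have hall : ∀ y ∈ ("." :: xs.takeWhile (fun y => y == ".")), y = "." := by
          intro y hy
          rcases List.mem_cons.mp hy with h | h
          · exact h
          · exact htake y h
        have := aGo_run ("." :: xs.takeWhile (fun y => y == "."))
          hall (xs.dropWhile (fun y => y == ".")) idx 0 n
        simp only [List.cons_append, List.length_cons] at this
        rw [hsplit] at this
        rw [this]
        rw [findConsecutiveDotsAltGo]
        simp only [beq_self_eq_true, true_and]
        by_cases hc : 1 ≤ n ∧ n ≤ 1 + ((xs.takeWhile (fun y => y == ".")).length : Int)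
        · rw [if_pos (by push_cast; omega), if_pos hc]
          simp
        · rw [if_neg (by push_cast at hc ⊢; omega), if_neg hc]
          rw [aGo_reset _ (dropWhile_head _ xs)]
          rw [ih _ hdroplen]
          congr 1 <;> (push_cast; omega)
      · -- x is not a dot: A resets at x then skips the equal run; B jumps it
        have hxb : (x == ".") = false := by simpa using hx
        have hskip : ∀ y ∈ xs.takeWhile (fun y => y == x), y ≠ "." := by
          intro y hy; rw [htake y hy]; exact hx
        rw [findConsecutiveDotsAltGo]
        rw [if_neg (by simp [hxb])]
        conv_lhs => rw [show x :: xs = x :: (xs.takeWhile (fun y => y == x) ++ xs.dropWhile (fun y => y == x)) from by rw [hsplit]]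
        simp only [findConsecutiveDotsGo, hxb, Bool.false_eq_true, if_false]
        rw [aGo_skip _ hskip]
        rw [ih _ hdroplen]
        congr 1; push_cast; omega

-- ===== VERDICT (by name: the statement is the Claim_ definition above) =====
theorem find_consecutive_dots_spec : Claim_equal_find_consecutive_dots := by
  intro lst n _
  unfold Spec_find_consecutive_dots find_consecutive_dots find_consecutive_dots_alt
  exact main_lemma lst.length lst le_rfl 0 n
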